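-- pv_equiv track=rewrite | github.com/theghostinashell/StockAnalyzer | stock_analyzer/data/stock_fetcher.py | normalize_symbol
-- ===== SOURCE A (Python) =====
-- from typing import Dict, List, Optional
--
-- def normalize_symbol(symbol: str) -> str:
--     """
--     Normalize symbol for different exchanges.
--     Handles various exchange suffixes and formats.
--     """
--     symbol = symbol.upper().strip()
--
--     # Exchange-specific symbol mappings
--     exchange_mappings = {
--         # Indian exchanges
--         'NSE': '.NS',  # National Stock Exchange
--         'BSE': '.BO',  # Bombay Stock Exchange
--
--         # London Stock Exchange
--         'LSE': '.L',
--
--         # Tokyo Stock Exchange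
--         'TSE': '.T',
--
--         # US exchanges (default, no suffix needed)
--         'NYSE': '',
--         'NASDAQ': '',
--     }
--
--     # Check if symbol already has exchange suffix
--     if any(symbol.endswith(suffix) for suffix in ['.NS', '.BO', '.L', '.T']):
--         return symbol
--
--     # For Indian stocks without suffix, default to NSE
--     if symbol in get_indian_stocks():
--         return symbol + '.NS'
--
--     # For London stocks without suffix, add .L
--     if symbol in get_london_stocks():
--         return symbol + '.L'
--
--     # For Tokyo stocks without suffix, add .T
--     if symbol in get_tokyo_stocks():
--         return symbol + '.T'
--
--     # US stocks (default)
--     return symbol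
--
-- def get_indian_stocks() -> List[str]:
--     """Get major Indian stocks (NSE)."""
--     return [
--         "RELIANCE", "TCS", "HDFCBANK", "INFY", "ICICIBANK", "HINDUNILVR", "ITC", "SBIN",
--         "BHARTIARTL", "KOTAKBANK", "AXISBANK", "ASIANPAINT", "MARUTI", "HCLTECH",
--         "SUNPHARMA", "TATAMOTORS", "WIPRO", "ULTRACEMCO", "TITAN", "BAJFINANCE",
--         "NESTLEIND", "POWERGRID", "BAJAJFINSV", "NTPC", "ONGC", "COALINDIA",
--         "JSWSTEEL", "TECHM", "ADANIENT", "HINDALCO", "ADANIPORTS", "TATASTEEL",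
--         "BRITANNIA", "SHREECEM", "HEROMOTOCO", "INDUSINDBK", "DIVISLAB", "EICHERMOT",
--         "DRREDDY", "CIPLA", "BPCL", "HCLTECH", "TATACONSUM", "VEDL", "GRASIM"
--     ]
--
-- def get_london_stocks() -> List[str]:
--     """Get major London Stock Exchange stocks."""
--     return [
--         "HSBA", "GSK", "ULVR", "BHP", "RIO", "REL", "LSEG", "CRH", "PRU", "MB",
--         "SHEL", "BP", "VOD", "BT-A", "BARC", "LLOY", "RKT", "WPP", "AAL", "GE",
--         "CNA", "SGE", "IMB", "RKT", "WPP", "AAL", "SGE", "CNA", "RKT", "WPP"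
--     ]
--
-- def get_tokyo_stocks() -> List[str]:
--     """Get major Tokyo Stock Exchange stocks."""
--     return [
--         "7203", "6758", "6861", "9984", "7974", "6954", "836", "9433", "4502",
--         "4519", "6501", "6594", "7733", "4911", "7269", "6098", "4063", "4568",
--         "4661", "4755", "4689", "474", "4543", "4578", "4689", "474", "4543"
--     ]
-- ===== SOURCE B (Python) =====
-- # One flat sorted symbol->suffix table searched by hand-written binary search
-- # replaces the three per-call list scans; US/unknown symbols fall through unchanged.
-- _TABLE = [
--     ("4063", ".T"), ("4502", ".T"), ("4519", ".T"), ("4543", ".T"), ("4568", ".T"),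
--     ("4578", ".T"), ("4661", ".T"), ("4689", ".T"), ("474", ".T"), ("4755", ".T"),
--     ("4911", ".T"), ("6098", ".T"), ("6501", ".T"), ("6594", ".T"), ("6758", ".T"),
--     ("6861", ".T"), ("6954", ".T"), ("7203", ".T"), ("7269", ".T"), ("7733", ".T"),
--     ("7974", ".T"), ("836", ".T"), ("9433", ".T"), ("9984", ".T"),
--     ("AAL", ".L"), ("ADANIENT", ".NS"), ("ADANIPORTS", ".NS"), ("ASIANPAINT", ".NS"),
--     ("AXISBANK", ".NS"), ("BAJAJFINSV", ".NS"), ("BAJFINANCE", ".NS"), ("BARC", ".L"),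
--     ("BHARTIARTL", ".NS"), ("BHP", ".L"), ("BP", ".L"), ("BPCL", ".NS"),
--     ("BRITANNIA", ".NS"), ("BT-A", ".L"), ("CIPLA", ".NS"), ("CNA", ".L"),
--     ("COALINDIA", ".NS"), ("CRH", ".L"), ("DIVISLAB", ".NS"), ("DRREDDY", ".NS"),
--     ("EICHERMOT", ".NS"), ("GE", ".L"), ("GRASIM", ".NS"), ("GSK", ".L"),
--     ("HCLTECH", ".NS"), ("HDFCBANK", ".NS"), ("HEROMOTOCO", ".NS"), ("HINDALCO", ".NS"),
--     ("HINDUNILVR", ".NS"), ("HSBA", ".L"), ("ICICIBANK", ".NS"), ("IMB", ".L"),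
--     ("INDUSINDBK", ".NS"), ("INFY", ".NS"), ("ITC", ".NS"), ("JSWSTEEL", ".NS"),
--     ("KOTAKBANK", ".NS"), ("LLOY", ".L"), ("LSEG", ".L"), ("MARUTI", ".NS"),
--     ("MB", ".L"), ("NESTLEIND", ".NS"), ("NTPC", ".NS"), ("ONGC", ".NS"),
--     ("POWERGRID", ".NS"), ("PRU", ".L"), ("REL", ".L"), ("RELIANCE", ".NS"),
--     ("RIO", ".L"), ("RKT", ".L"), ("SBIN", ".NS"), ("SGE", ".L"),
--     ("SHEL", ".L"), ("SHREECEM", ".NS"), ("SUNPHARMA", ".NS"), ("TATACONSUM", ".NS"),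
--     ("TATAMOTORS", ".NS"), ("TATASTEEL", ".NS"), ("TCS", ".NS"), ("TECHM", ".NS"),
--     ("TITAN", ".NS"), ("ULTRACEMCO", ".NS"), ("ULVR", ".L"), ("VEDL", ".NS"),
--     ("VOD", ".L"), ("WIPRO", ".NS"), ("WPP", ".L"),
-- ]
--
-- def normalize_symbol(symbol: str) -> str:
--     symbol = symbol.upper().strip()
--     if any(symbol.endswith(suffix) for suffix in ['.NS', '.BO', '.L', '.T']):
--         return symbol
--     lo, hi = 0, len(_TABLE)
--     while lo < hi:
--         mid = (lo + hi) // 2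
--         key, suffix = _TABLE[mid]
--         if key < symbol:
--             lo = mid + 1
--         elif symbol < key:
--             hi = mid
--         else:
--             return symbol + suffix
--     return symbol
-- ===== Notes on version B (the rewrite author's own statement) =====
-- stated objective: alternative
-- what changed: Replaced the three sequential list-membership branches by one flat sorted symbol-to-suffix table (duplicates and the Indian>London>Tokyo precedence resolved once, offline) searched with a hand-written lo/hi binary-search loop; unmatched symbols fall through unchanged.
import Mathlib
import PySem

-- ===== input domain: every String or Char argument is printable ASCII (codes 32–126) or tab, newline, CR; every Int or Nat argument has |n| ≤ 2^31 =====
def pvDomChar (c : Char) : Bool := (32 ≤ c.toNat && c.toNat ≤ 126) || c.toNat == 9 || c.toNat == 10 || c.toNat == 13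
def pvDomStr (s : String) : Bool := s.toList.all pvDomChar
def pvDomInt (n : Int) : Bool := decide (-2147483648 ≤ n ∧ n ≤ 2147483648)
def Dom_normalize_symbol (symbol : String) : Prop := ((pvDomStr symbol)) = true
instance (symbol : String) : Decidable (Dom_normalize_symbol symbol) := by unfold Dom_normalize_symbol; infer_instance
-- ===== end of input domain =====

-- B replaces A's three per-call list-membership scans by binary search in one flat
-- sorted symbol→suffix table (precedence resolved once, offline); objective: alternative.

-- ===== PORT A =====

def get_indian_stocks : List String :=
  ["RELIANCE", "TCS", "HDFCBANK", "INFY", "ICICIBANK", "HINDUNILVR", "ITC", "SBIN",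
   "BHARTIARTL", "KOTAKBANK", "AXISBANK", "ASIANPAINT", "MARUTI", "HCLTECH",
   "SUNPHARMA", "TATAMOTORS", "WIPRO", "ULTRACEMCO", "TITAN", "BAJFINANCE",
   "NESTLEIND", "POWERGRID", "BAJAJFINSV", "NTPC", "ONGC", "COALINDIA",
   "JSWSTEEL", "TECHM", "ADANIENT", "HINDALCO", "ADANIPORTS", "TATASTEEL",
   "BRITANNIA", "SHREECEM", "HEROMOTOCO", "INDUSINDBK", "DIVISLAB", "EICHERMOT",
   "DRREDDY", "CIPLA", "BPCL", "HCLTECH", "TATACONSUM", "VEDL", "GRASIM"]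

def get_london_stocks : List String :=
  ["HSBA", "GSK", "ULVR", "BHP", "RIO", "REL", "LSEG", "CRH", "PRU", "MB",
   "SHEL", "BP", "VOD", "BT-A", "BARC", "LLOY", "RKT", "WPP", "AAL", "GE",
   "CNA", "SGE", "IMB", "RKT", "WPP", "AAL", "SGE", "CNA", "RKT", "WPP"]

def get_tokyo_stocks : List String :=
  ["7203", "6758", "6861", "9984", "7974", "6954", "836", "9433", "4502",
   "4519", "6501", "6594", "7733", "4911", "7269", "6098", "4063", "4568",
   "4661", "4755", "4689", "474", "4543", "4578", "4689", "474", "4543"]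

-- body of A after the rebinding symbol = symbol.upper().strip()
def normalize_symbol_go (s : String) : String :=
  if ([".NS", ".BO", ".L", ".T"].any (fun suffix => PySem.Str.endswith s suffix)) then s
  else if s ∈ get_indian_stocks then s ++ ".NS"
  else if s ∈ get_london_stocks then s ++ ".L"
  else if s ∈ get_tokyo_stocks then s ++ ".T"
  else s

def normalize_symbol (symbol : String) : String :=
  normalize_symbol_go (PySem.Str.strip (PySem.Str.upper symbol))

-- ===== PORT B =====
-- _TABLE: one flat sorted symbol→suffix table (duplicates and precedence resolved offline)
def pvTable : List (String × String) :=
  [("4063", ".T"), ("4502", ".T"), ("4519", ".T"), ("4543", ".T"), ("4568", ".T"),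
   ("4578", ".T"), ("4661", ".T"), ("4689", ".T"), ("474", ".T"), ("4755", ".T"),
   ("4911", ".T"), ("6098", ".T"), ("6501", ".T"), ("6594", ".T"), ("6758", ".T"),
   ("6861", ".T"), ("6954", ".T"), ("7203", ".T"), ("7269", ".T"), ("7733", ".T"),
   ("7974", ".T"), ("836", ".T"), ("9433", ".T"), ("9984", ".T"),
   ("AAL", ".L"), ("ADANIENT", ".NS"), ("ADANIPORTS", ".NS"), ("ASIANPAINT", ".NS"),
   ("AXISBANK", ".NS"), ("BAJAJFINSV", ".NS"), ("BAJFINANCE", ".NS"), ("BARC", ".L"),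
   ("BHARTIARTL", ".NS"), ("BHP", ".L"), ("BP", ".L"), ("BPCL", ".NS"),
   ("BRITANNIA", ".NS"), ("BT-A", ".L"), ("CIPLA", ".NS"), ("CNA", ".L"),
   ("COALINDIA", ".NS"), ("CRH", ".L"), ("DIVISLAB", ".NS"), ("DRREDDY", ".NS"),
   ("EICHERMOT", ".NS"), ("GE", ".L"), ("GRASIM", ".NS"), ("GSK", ".L"),
   ("HCLTECH", ".NS"), ("HDFCBANK", ".NS"), ("HEROMOTOCO", ".NS"), ("HINDALCO", ".NS"),
   ("HINDUNILVR", ".NS"), ("HSBA", ".L"), ("ICICIBANK", ".NS"), ("IMB", ".L"),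
   ("INDUSINDBK", ".NS"), ("INFY", ".NS"), ("ITC", ".NS"), ("JSWSTEEL", ".NS"),
   ("KOTAKBANK", ".NS"), ("LLOY", ".L"), ("LSEG", ".L"), ("MARUTI", ".NS"),
   ("MB", ".L"), ("NESTLEIND", ".NS"), ("NTPC", ".NS"), ("ONGC", ".NS"),
   ("POWERGRID", ".NS"), ("PRU", ".L"), ("REL", ".L"), ("RELIANCE", ".NS"),
   ("RIO", ".L"), ("RKT", ".L"), ("SBIN", ".NS"), ("SGE", ".L"),
   ("SHEL", ".L"), ("SHREECEM", ".NS"), ("SUNPHARMA", ".NS"), ("TATACONSUM", ".NS"),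
   ("TATAMOTORS", ".NS"), ("TATASTEEL", ".NS"), ("TCS", ".NS"), ("TECHM", ".NS"),
   ("TITAN", ".NS"), ("ULTRACEMCO", ".NS"), ("ULVR", ".L"), ("VEDL", ".NS"),
   ("VOD", ".L"), ("WIPRO", ".NS"), ("WPP", ".L")]

-- B's while lo < hi binary-search loop, as recursion on hi - lo
def pvBSearch (s : String) (lo hi : Nat) : Option String :=
  if _h : lo < hi then
    let mid := (lo + hi) / 2
    match pvTable[mid]? with
    | some p =>
        if p.1 < s then pvBSearch s (mid + 1) hi
        else if s < p.1 then pvBSearch s lo mid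
        else some p.2
    | none => none
  else none
termination_by hi - lo
decreasing_by all_goals omega

-- body of B after the rebinding symbol = symbol.upper().strip()
def normalize_symbol_alt_go (s : String) : String :=
  if ([".NS", ".BO", ".L", ".T"].any (fun suffix => PySem.Str.endswith s suffix)) then s
  else
    match pvBSearch s 0 pvTable.length with
    | some suffix => s ++ suffix
    | none => s

def normalize_symbol_alt (symbol : String) : String :=
  normalize_symbol_alt_go (PySem.Str.strip (PySem.Str.upper symbol))

-- ===== PRECONDITION & SPEC =====
def Spec_normalize_symbol (symbol : String) (out : String) : Prop := out = normalize_symbol_alt symbol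
instance (symbol : String) (out : String) : Decidable (Spec_normalize_symbol symbol out) := by unfold Spec_normalize_symbol; infer_instance

-- ===== CLAIM (what is proved, stated in full; the proofs are below) =====
def Claim_equal_normalize_symbol : Prop := ∀ (symbol : String), Dom_normalize_symbol symbol → Spec_normalize_symbol symbol (normalize_symbol symbol)

-- ===== LEMMAS AND PROOFS =====

-- A's suffix chain as an Option, for bookkeeping
def pvChainOpt (s : String) : Option String :=
  if s ∈ get_indian_stocks then some ".NS"
  else if s ∈ get_london_stocks then some ".L"
  else if s ∈ get_tokyo_stocks then some ".T"
  else none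

def pvAllSyms : List String := get_indian_stocks ++ get_london_stocks ++ get_tokyo_stocks

theorem pvTable_sorted : pvTable.Pairwise (fun a b => a.1 < b.1) := by
  have h : pvTable.Pairwise (fun a b => a.1.toList < b.1.toList) := by decide
  exact h.imp (fun hab => String.lt_iff_toList_lt.mpr hab)

theorem pvTable_keys_sub : ∀ p ∈ pvTable, p.1 ∈ pvAllSyms := by decide

-- first match at index j when no earlier index matches
theorem find?_eq_some_of_getElem {α : Type} (p : α → Bool) :
    ∀ (l : List α) (j : Nat) (hj : j < l.length), p l[j] = true →
      (∀ i (hi : i < j), p (l[i]'(by omega)) = false) → l.find? p = some l[j] := by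
  intro l
  induction l with
  | nil => intro j hj; simp at hj
  | cons a t ih =>
    intro j hj hpj hprev
    cases j with
    | zero => simp_all
    | succ k =>
      have ha : p a = false := hprev 0 (Nat.succ_pos k)
      simp only [List.find?_cons, ha]
      exact ih k (by simpa using hj) (by simpa using hpj)
        (fun i hi => hprev (i + 1) (by omega))

theorem pvBSearch_eq_find? (s : String) :
    ∀ n lo hi, hi - lo ≤ n → hi ≤ pvTable.length →
      (∀ i (hi' : i < pvTable.length), i < lo → pvTable[i].1 < s) →
      (∀ i (hi' : i < pvTable.length), hi ≤ i → s < pvTable[i].1) →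
      pvBSearch s lo hi = (pvTable.find? (fun p => p.1 == s)).map (·.2) := by
  intro n
  induction n with
  | zero =>
    intro lo hi hn hlen hlo hhi
    rw [pvBSearch]
    have h1 : ¬ lo < hi := by omega
    rw [dif_neg h1]
    have hnone : pvTable.find? (fun p => p.1 == s) = none := by
      rw [List.find?_eq_none]
      intro x hx
      rcases List.mem_iff_getElem.mp hx with ⟨i, hi', rfl⟩
      by_cases hc : i < lo
      · intro h; exact absurd (eq_of_beq h) (ne_of_lt (hlo i hi' hc))
      · intro h; exact absurd (eq_of_beq h) (ne_of_gt (hhi i hi' (by omega)))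
    rw [hnone]; rfl
  | succ m ih =>
    intro lo hi hn hlen hlo hhi
    by_cases h1 : lo < hi
    · rw [pvBSearch, dif_pos h1]
      have hm1 : lo ≤ (lo + hi) / 2 := by omega
      have hm2 : (lo + hi) / 2 < hi := by omega
      have hmidlt : (lo + hi) / 2 < pvTable.length := by omega
      have hget : pvTable[(lo + hi) / 2]? = some (pvTable[(lo + hi) / 2]) :=
        List.getElem?_eq_getElem hmidlt
      simp only [hget]
      by_cases hlt : pvTable[(lo + hi) / 2].1 < s
      · rw [if_pos hlt]
        apply ih ((lo + hi) / 2 + 1) hi (by omega) hlen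
        · intro i hi' hilt
          by_cases hc : i < lo
          · exact hlo i hi' hc
          · rcases Nat.lt_or_ge i ((lo + hi) / 2) with hc2 | hc2
            · exact lt_trans (List.pairwise_iff_getElem.mp pvTable_sorted i _ hi' hmidlt hc2) hlt
            · have hieq : i = (lo + hi) / 2 := by omega
              subst hieq; exact hlt
        · exact hhi
      · rw [if_neg hlt]
        by_cases hgt : s < pvTable[(lo + hi) / 2].1
        · rw [if_pos hgt]
          apply ih lo ((lo + hi) / 2) (by omega) (by omega) hlo
          intro i hi' hge
          rcases Nat.lt_or_ge ((lo + hi) / 2) i with hc2 | hc2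
          · exact lt_trans hgt (List.pairwise_iff_getElem.mp pvTable_sorted _ i hmidlt hi' hc2)
          · have hieq : i = (lo + hi) / 2 := by omega
            subst hieq; exact hgt
        · rw [if_neg hgt]
          have heq : pvTable[(lo + hi) / 2].1 = s :=
            le_antisymm (not_lt.mp hgt) (not_lt.mp hlt)
          have hpj : ((pvTable[(lo + hi) / 2]).1 == s) = true := beq_iff_eq.mpr heq
          have hf := find?_eq_some_of_getElem (fun p => p.1 == s) pvTable ((lo + hi) / 2)
            hmidlt hpj
            (fun i hi' => by
              have hlt' := List.pairwise_iff_getElem.mp pvTable_sorted i _ (by omega) hmidlt hi'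
              rw [heq] at hlt'
              show (pvTable[i].1 == s) = false
              exact beq_eq_false_iff_ne.mpr (ne_of_lt hlt'))
          rw [hf]; rfl
    · exact ih lo hi (by omega) hlen hlo hhi

theorem find?_table_mem : ∀ s ∈ pvAllSyms,
    (pvTable.find? (fun p => p.1 == s)).map (·.2) = pvChainOpt s := by decide

theorem find?_table_eq_chain (s : String) :
    (pvTable.find? (fun p => p.1 == s)).map (·.2) = pvChainOpt s := by
  by_cases hs : s ∈ pvAllSyms
  · exact find?_table_mem s hs
  · have hfind : pvTable.find? (fun p => p.1 == s) = none := by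
      rw [List.find?_eq_none]
      intro x hx h
      exact hs (eq_of_beq h ▸ pvTable_keys_sub x hx)
    have h1 : s ∉ get_indian_stocks := fun h => hs (List.mem_append.mpr (Or.inl (List.mem_append.mpr (Or.inl h))))
    have h2 : s ∉ get_london_stocks := fun h => hs (List.mem_append.mpr (Or.inl (List.mem_append.mpr (Or.inr h))))
    have h3 : s ∉ get_tokyo_stocks := fun h => hs (List.mem_append.mpr (Or.inr h))
    simp [hfind, pvChainOpt, h1, h2, h3]

theorem go_eq (s : String) : normalize_symbol_go s = normalize_symbol_alt_go s := by
  unfold normalize_symbol_go normalize_symbol_alt_go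
  rw [pvBSearch_eq_find? s pvTable.length 0 pvTable.length (by omega) (le_refl _)
      (by omega) (by omega), find?_table_eq_chain]
  unfold pvChainOpt
  split_ifs <;> rfl

theorem normalize_symbol_eq (symbol : String) :
    normalize_symbol symbol = normalize_symbol_alt symbol :=
  go_eq (PySem.Str.strip (PySem.Str.upper symbol))

-- ===== VERDICT (by name: the statement is the Claim_ definition above) =====
theorem normalize_symbol_spec : Claim_equal_normalize_symbol := by
  intro symbol _
  exact normalize_symbol_eq symbol
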